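-- pv_equiv track=rewrite | github.com/PPinto22/LeetCode | codejam/2020 Round 1C/a.py | get_peppurr_positions
-- ===== SOURCE A (Python) =====
-- def get_peppurr_positions(x, y, m):
--     position = (x, y)
--     positions = [position]
--     for move in m:
--         (x, y) = position
--         if move == 'N':
--             position = (x, y+1)
--         elif move == 'E':
--             position = (x+1, y)
--         elif move == 'S':
--             position = (x, y-1)
--         elif move == 'W':
--             position = (x-1, y)
--         positions.append(position)
--     return positions
-- ===== SOURCE B (Python) =====
-- def get_peppurr_positions(x, y, m):
--     DELTAS = {'N': (0, 1), 'E': (1, 0), 'S': (0, -1), 'W': (-1, 0)}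
--     deltas = [DELTAS.get(c, (0, 0)) for c in m]
--     fx = x + sum(dx for dx, _ in deltas)
--     fy = y + sum(dy for _, dy in deltas)
--     out = [(fx, fy)]
--     for dx, dy in reversed(deltas):
--         fx -= dx
--         fy -= dy
--         out.append((fx, fy))
--     out.reverse()
--     return out
-- ===== Notes on version B (the rewrite author's own statement) =====
-- stated objective: alternative
-- what changed: B first computes the endpoint by summing the per-move deltas, then reconstructs the path BACKWARDS from the endpoint by undoing moves in reverse, building the output back-to-front and reversing it, instead of A's forward mutate-and-append walk.
import Mathlib
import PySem

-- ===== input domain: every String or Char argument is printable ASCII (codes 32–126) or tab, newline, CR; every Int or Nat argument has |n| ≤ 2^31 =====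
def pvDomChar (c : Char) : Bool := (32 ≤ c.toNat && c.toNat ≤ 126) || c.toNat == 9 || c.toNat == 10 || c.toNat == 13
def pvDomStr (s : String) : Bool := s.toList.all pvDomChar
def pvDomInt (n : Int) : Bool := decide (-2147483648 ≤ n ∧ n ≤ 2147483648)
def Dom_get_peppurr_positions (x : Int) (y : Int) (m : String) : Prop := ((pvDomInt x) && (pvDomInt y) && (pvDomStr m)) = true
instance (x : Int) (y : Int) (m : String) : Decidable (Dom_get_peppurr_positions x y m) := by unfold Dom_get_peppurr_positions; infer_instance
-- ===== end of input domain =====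

-- B computes the endpoint by summing deltas and rebuilds the path backwards from it (output built
-- back-to-front, then reversed); A walks forward mutating a position and appending. Objective: alternative.

-- ===== PORT A =====
-- A's loop: state = (current position, accumulated list)
def pvAGo : Int × Int → List (Int × Int) → List Char → List (Int × Int)
  | _, acc, [] => acc
  | (x, y), acc, c :: rest =>
    let pos :=
      if c = 'N' then (x, y + 1)
      else if c = 'E' then (x + 1, y)
      else if c = 'S' then (x, y - 1)
      else if c = 'W' then (x - 1, y)
      else (x, y)
    pvAGo pos (acc ++ [pos]) rest

def get_peppurr_positions (x : Int) (y : Int) (m : String) : List (Int × Int) :=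
  pvAGo (x, y) [(x, y)] m.toList

-- ===== PORT B =====
-- DELTAS.get(c, (0, 0))
def pvDelta (c : Char) : Int × Int :=
  PySem.Dict.getD
    (PySem.Dict.ofList [('N', ((0 : Int), (1 : Int))), ('E', (1, 0)), ('S', (0, -1)), ('W', (-1, 0))])
    c (0, 0)

-- B's loop over reversed(deltas): state = (fx, fy, out); appends (fx-dx, fy-dy)
def pvBGo : Int → Int → List (Int × Int) → List (Int × Int) → List (Int × Int)
  | _, _, out, [] => out
  | fx, fy, out, (dx, dy) :: rest =>
    pvBGo (fx - dx) (fy - dy) (out ++ [(fx - dx, fy - dy)]) rest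

def get_peppurr_positions_alt (x : Int) (y : Int) (m : String) : List (Int × Int) :=
  let deltas := m.toList.map pvDelta
  let fx := x + (deltas.map Prod.fst).sum
  let fy := y + (deltas.map Prod.snd).sum
  (pvBGo fx fy [(fx, fy)] deltas.reverse).reverse

-- ===== PRECONDITION & SPEC =====
def Spec_get_peppurr_positions (x : Int) (y : Int) (m : String) (out : List (Int × Int)) : Prop := out = get_peppurr_positions_alt x y m
instance (x : Int) (y : Int) (m : String) (out : List (Int × Int)) : Decidable (Spec_get_peppurr_positions x y m out) := by unfold Spec_get_peppurr_positions; infer_instance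

-- ===== CLAIM (what is proved, stated in full; the proofs are below) =====
def Claim_equal_get_peppurr_positions : Prop := ∀ (x : Int) (y : Int) (m : String), Dom_get_peppurr_positions x y m → Spec_get_peppurr_positions x y m (get_peppurr_positions x y m)

-- ===== LEMMAS AND PROOFS =====

-- the forward walk both programs compute positions of
def pvWalk : Int → Int → List (Int × Int) → List (Int × Int)
  | x, y, [] => [(x, y)]
  | x, y, (dx, dy) :: r => (x, y) :: pvWalk (x + dx) (y + dy) r

-- accumulator-free form of B's loop
def pvBackW : Int → Int → List (Int × Int) → List (Int × Int)
  | _, _, [] => []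
  | fx, fy, (dx, dy) :: r => (fx - dx, fy - dy) :: pvBackW (fx - dx) (fy - dy) r

theorem pvDelta_spec (c : Char) :
    pvDelta c = if c = 'N' then ((0 : Int), (1 : Int)) else if c = 'E' then (1, 0)
      else if c = 'S' then (0, -1) else if c = 'W' then (-1, 0) else (0, 0) := by
  unfold pvDelta
  rw [show PySem.Dict.ofList [('N', ((0:Int),(1:Int))), ('E', (1,0)), ('S', (0,-1)), ('W', (-1,0))]
      = PySem.Dict.mk [('N', (0,1)), ('E', (1,0)), ('S', (0,-1)), ('W', (-1,0))] from rfl]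
  simp [PySem.Dict.getD_eq_get?_getD, PySem.Dict.get?_mk_cons]
  split_ifs <;> simp_all [PySem.Dict.get?, eq_comm]

-- A's if/elif step is one delta step
theorem pvStep_eq (x y : Int) (c : Char) :
    (if c = 'N' then (x, y + 1)
     else if c = 'E' then (x + 1, y)
     else if c = 'S' then (x, y - 1)
     else if c = 'W' then (x - 1, y)
     else (x, y)) = (x + (pvDelta c).1, y + (pvDelta c).2) := by
  rw [pvDelta_spec]
  split_ifs <;> simp <;> omega

theorem pvWalk_ne_nil (x y : Int) (d : List (Int × Int)) : pvWalk x y d ≠ [] := by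
  cases d with
  | nil => simp [pvWalk]
  | cons h r => obtain ⟨dx, dy⟩ := h; simp [pvWalk]

-- A's loop produces the tail of the walk, appended to its accumulator
theorem pvAGo_eq (l : List Char) : ∀ (x y : Int) (acc : List (Int × Int)),
    pvAGo (x, y) acc l = acc ++ (pvWalk x y (l.map pvDelta)).tail := by
  induction l with
  | nil => intro x y acc; simp [pvAGo, pvWalk]
  | cons c rest ih =>
    intro x y acc
    simp only [pvAGo, pvStep_eq, ih, List.map_cons, pvWalk]
    cases hw : pvWalk (x + (pvDelta c).1) (y + (pvDelta c).2) (rest.map pvDelta) with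
    | nil => exact absurd hw (pvWalk_ne_nil _ _ _)
    | cons p t =>
      have hp : p = (x + (pvDelta c).1, y + (pvDelta c).2) := by
        cases hm : rest.map pvDelta with
        | nil => rw [hm] at hw; simp [pvWalk] at hw; simp [hw.1]
        | cons q r => obtain ⟨qx, qy⟩ := q; rw [hm] at hw; simp [pvWalk] at hw; simp [hw.1]
      simp [hp, List.append_assoc]

-- B's loop is pvBackW appended to its accumulator
theorem pvBGo_eq (rl : List (Int × Int)) : ∀ (fx fy : Int) (out : List (Int × Int)),
    pvBGo fx fy out rl = out ++ pvBackW fx fy rl := by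
  induction rl with
  | nil => intro fx fy out; simp [pvBGo, pvBackW]
  | cons d r ih =>
    intro fx fy out
    obtain ⟨dx, dy⟩ := d
    simp [pvBGo, pvBackW, ih, List.append_assoc]

theorem pvBackW_append (a : List (Int × Int)) : ∀ (fx fy : Int) (b : List (Int × Int)),
    pvBackW fx fy (a ++ b)
      = pvBackW fx fy a ++ pvBackW (fx - (a.map Prod.fst).sum) (fy - (a.map Prod.snd).sum) b := by
  induction a with
  | nil => intro fx fy b; simp [pvBackW]
  | cons d r ih =>
    intro fx fy b
    obtain ⟨dx, dy⟩ := d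
    simp [pvBackW, ih]
    ring_nf

-- reverse reconstruction from the endpoint yields the walk without its last element, reversed
theorem pvBackW_rev (d : List (Int × Int)) : ∀ (x y : Int),
    pvBackW (x + (d.map Prod.fst).sum) (y + (d.map Prod.snd).sum) d.reverse
      = (pvWalk x y d).dropLast.reverse := by
  induction d with
  | nil => intro x y; simp [pvBackW, pvWalk]
  | cons hd r ih =>
    intro x y
    obtain ⟨dx, dy⟩ := hd
    rw [List.reverse_cons, pvBackW_append]
    have h1 : x + ((((dx, dy) :: r).map Prod.fst).sum)
        = (x + dx) + ((r.map Prod.fst).sum) := by simp; ring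
    have h2 : y + ((((dx, dy) :: r).map Prod.snd).sum)
        = (y + dy) + ((r.map Prod.snd).sum) := by simp; ring
    rw [h1, h2]
    have hs1 : ((r.reverse.map Prod.fst).sum : Int) = (r.map Prod.fst).sum := by
      rw [List.map_reverse, List.sum_reverse]
    have hs2 : ((r.reverse.map Prod.snd).sum : Int) = (r.map Prod.snd).sum := by
      rw [List.map_reverse, List.sum_reverse]
    rw [hs1, hs2, ih (x + dx) (y + dy)]
    have hlast : pvBackW (x + dx + (r.map Prod.fst).sum - (r.map Prod.fst).sum)
        (y + dy + (r.map Prod.snd).sum - (r.map Prod.snd).sum) [(dx, dy)] = [(x, y)] := by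
      simp [pvBackW]
    rw [hlast]
    have hne := pvWalk_ne_nil (x + dx) (y + dy) r
    simp [pvWalk, List.dropLast_cons_of_ne_nil hne]

-- the walk is its dropLast plus the endpoint
theorem pvWalk_split (d : List (Int × Int)) : ∀ (x y : Int),
    pvWalk x y d
      = (pvWalk x y d).dropLast ++ [(x + (d.map Prod.fst).sum, y + (d.map Prod.snd).sum)] := by
  induction d with
  | nil => intro x y; simp [pvWalk]
  | cons hd r ih =>
    intro x y
    obtain ⟨dx, dy⟩ := hd
    have hne := pvWalk_ne_nil (x + dx) (y + dy) r
    simp only [pvWalk, List.dropLast_cons_of_ne_nil hne, List.cons_append]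
    rw [ih (x + dx) (y + dy)]
    simp
    constructor <;> ring

theorem pvWalk_head (x y : Int) (d : List (Int × Int)) :
    pvWalk x y d = (x, y) :: (pvWalk x y d).tail := by
  cases d with
  | nil => simp [pvWalk]
  | cons h r => obtain ⟨dx, dy⟩ := h; simp [pvWalk]

-- ===== VERDICT (by name: the statement is the Claim_ definition above) =====
theorem get_peppurr_positions_spec : Claim_equal_get_peppurr_positions := by
  intro x y m _
  unfold Spec_get_peppurr_positions get_peppurr_positions get_peppurr_positions_alt
  simp only []
  rw [pvAGo_eq, pvBGo_eq, List.reverse_append, pvBackW_rev]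
  simp only [List.reverse_reverse, List.reverse_singleton, List.singleton_append]
  rw [← pvWalk_split]
  exact (pvWalk_head x y (m.toList.map pvDelta)).symm
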